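-- pv_equiv track=rewrite | github.com/Cure549/mo-menus | Boxxy/Boxxy.py | largest_data
-- ===== SOURCE A (Python) =====
-- def largest_data(title, prev, data):
--     largest_entry = 1
--
--     # Find largest entry
--     for entry in data:
--         if (len(entry) > largest_entry):
--             largest_entry = len(entry)
--     # Check Title
--     if (len(title) > largest_entry):
--         largest_entry = len(title)
--     # Check Prev
--     if (len(prev) > largest_entry):
--         largest_entry = len(prev)
--     return largest_entry
-- ===== SOURCE B (Python) =====
-- def largest_data(title, prev, data):
--     lens = sorted((len(s) for s in [title, prev, *data]), reverse=True)
--     return lens[0] if lens[0] > 1 else 1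
-- ===== Notes on version B (the rewrite author's own statement) =====
-- stated objective: alternative
-- what changed: Replaces A's scalar running-max loop plus two separate title/prev if-guards by sorting all candidate lengths in descending order and taking the first element (with the floor 1 applied once at the end).
import Mathlib
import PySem

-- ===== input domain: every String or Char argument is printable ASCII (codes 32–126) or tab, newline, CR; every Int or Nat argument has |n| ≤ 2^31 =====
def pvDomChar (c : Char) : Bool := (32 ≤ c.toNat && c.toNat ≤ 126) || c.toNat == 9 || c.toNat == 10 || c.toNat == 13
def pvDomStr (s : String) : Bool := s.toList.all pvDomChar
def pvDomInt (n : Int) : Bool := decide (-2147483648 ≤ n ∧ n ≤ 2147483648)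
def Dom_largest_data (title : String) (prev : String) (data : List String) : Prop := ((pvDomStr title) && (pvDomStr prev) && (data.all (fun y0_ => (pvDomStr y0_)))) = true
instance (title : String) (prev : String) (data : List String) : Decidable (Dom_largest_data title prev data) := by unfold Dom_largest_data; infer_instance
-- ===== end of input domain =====

-- B computes the result by sorting all candidate lengths in descending order and taking the
-- first element (then applying the floor 1 once), instead of A's running-max loop plus two
-- if-guards (objective: alternative; sorting costs O(n log n) vs A's O(n)).

-- ===== PORT A =====
def largest_data (title : String) (prev : String) (data : List String) : Int :=
  let largest0 : Int :=
    data.foldl (fun acc entry => if PySem.Str.len entry > acc then PySem.Str.len entry else acc) 1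
  let largest1 : Int := if PySem.Str.len title > largest0 then PySem.Str.len title else largest0
  if PySem.Str.len prev > largest1 then PySem.Str.len prev else largest1

-- ===== PORT B =====
def largest_data_alt (title : String) (prev : String) (data : List String) : Int :=
  let lens : List Int :=
    PySem.List.sorted (([title, prev] ++ data).map (fun s => PySem.Str.len s)) (fun x => x) true
  -- lens[0]: the list contains len(title) and len(prev), so it is nonempty and pyGet? is some
  let top : Int := (PySem.List.pyGet? lens 0).getD 0
  if top > 1 then top else 1

-- ===== PRECONDITION & SPEC =====
def Spec_largest_data (title : String) (prev : String) (data : List String) (out : Int) : Prop := out = largest_data_alt title prev data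
instance (title : String) (prev : String) (data : List String) (out : Int) : Decidable (Spec_largest_data title prev data out) := by unfold Spec_largest_data; infer_instance

-- ===== CLAIM (what is proved, stated in full; the proofs are below) =====
def Claim_equal_largest_data : Prop := ∀ (title : String) (prev : String) (data : List String), Dom_largest_data title prev data → Spec_largest_data title prev data (largest_data title prev data)

-- ===== LEMMAS AND PROOFS =====

-- a fold of max over a list bounded by its start value stays at the start value
theorem foldl_max_of_le (l : List Int) (c : Int) (h : ∀ y ∈ l, y ≤ c) :
    l.foldl max c = c := by
  induction l with
  | nil => rfl
  | cons hd t ih =>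
      simp only [List.foldl]
      have hhd : hd ≤ c := h hd (by simp)
      rw [show max c hd = c by omega]
      exact ih (by intro y hy; exact h y (by simp [hy]))

-- folding max over a list whose maximum element is m gives max a m
theorem foldl_max_eq (l : List Int) (m : Int) (hmem : m ∈ l) (hub : ∀ y ∈ l, y ≤ m)
    (a : Int) : l.foldl max a = max a m := by
  induction l generalizing a with
  | nil => cases hmem
  | cons hd t ih =>
      simp only [List.foldl]
      by_cases ht : m ∈ t
      · rw [ih ht (by intro y hy; exact hub y (by simp [hy])) (max a hd)]
        have : hd ≤ m := hub hd (by simp)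
        omega
      · have hdm : hd = m := by
          rcases List.mem_cons.mp hmem with h | h
          · omega
          · exact absurd h ht
        subst hdm
        rw [foldl_max_of_le t (max a hd) (by
          intro y hy
          have := hub y (by simp [hy]); omega)]

-- A's data loop is a fold of max over the mapped lengths
theorem foldl_data_eq (data : List String) (a : Int) :
    data.foldl (fun acc entry => max acc (PySem.Str.len entry)) a
      = (data.map (fun s => PySem.Str.len s)).foldl max a := by
  induction data generalizing a with
  | nil => rfl
  | cons h t ih => simp only [List.foldl, List.map]; exact ih _

-- ===== VERDICT (by name: the statement is the Claim_ definition above) =====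
theorem largest_data_spec : Claim_equal_largest_data := by
  intro title prev data _
  unfold Spec_largest_data largest_data largest_data_alt
  simp only [show ∀ a b : Int, (if b > a then b else a) = max a b from by omega]
  rcases hs : PySem.List.sorted (([title, prev] ++ data).map (fun s => PySem.Str.len s))
      (fun x => x) true with _ | ⟨m, t⟩
  · exact absurd (congrArg List.length hs) (by simp [PySem.List.length_sorted])
  · have hub : ∀ y ∈ ([title, prev] ++ data).map (fun s => PySem.Str.len s), y ≤ m :=
      fun y hy => PySem.List.key_head_sorted_rev_ge _ (fun x => x) hs y hy
    have hmem : m ∈ ([title, prev] ++ data).map (fun s => PySem.Str.len s) := by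
      have hp := (PySem.List.sorted_perm
        (([title, prev] ++ data).map (fun s => PySem.Str.len s))
        (fun x => x) true).mem_iff (a := m)
      rw [hs] at hp
      exact hp.mp (by simp)
    -- rearrange A into a single fold over dataLens ++ [len title, len prev]
    rw [foldl_data_eq]
    have hfold :
        max (max ((data.map (fun s => PySem.Str.len s)).foldl max 1) (PySem.Str.len title))
            (PySem.Str.len prev)
        = ((data.map (fun s => PySem.Str.len s)) ++ [PySem.Str.len title, PySem.Str.len prev]).foldl max 1 := by
      rw [List.foldl_append]
      rfl
    rw [hfold, foldl_max_eq _ m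
      (by simp only [List.map_append, List.mem_append, List.map, List.mem_cons,
            List.not_mem_nil, or_false] at hmem ⊢; tauto)
      (by intro y hy; apply hub
          simp only [List.map_append, List.mem_append, List.map, List.mem_cons,
            List.not_mem_nil, or_false] at hy ⊢; tauto) 1]
    simp only [PySem.List.pyGet?, PySem.List.pyIdx?]
    norm_num
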